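-- pv_equiv track=rewrite | github.com/FPGA-Research-Manchester/FABulous | fabric/gen - Copy (2).py | GetTileFromFile
-- ===== SOURCE A (Python) =====
-- def RemoveComments( list ):
-- 	output = []
--
-- 	for sublist in list:
-- 		templist = []
-- 		marker = False		# we use this marker to remember if we had an '#' element before
-- 		for item in sublist:
-- 			if item.startswith('#'):
-- 				marker = True
-- 			if not (item.startswith('#') or marker == True):
-- 				# marker = True
-- 				templist.append(item)
-- 				if item == '':
-- 					templist.remove('')
-- 		if templist != []:
-- 			output.append(templist)
-- 	return output;
--
-- def GetTileFromFile( list, TileType ):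
-- 	templist = []
-- 	# output = []
-- 	marker = False
--
-- 	for sublist in list:
-- 		if ('EndTILE' in sublist):
-- 			marker = False
-- 		if ('TILE' in sublist) and (TileType in sublist):
-- 			marker = True
-- 		if marker == True:
-- 			templist.append(sublist)
-- 		# we place this conditional after the append such that the 'FabricBegin' will be kicked out
-- 		# if ('TILE' in sublist) and (type in sublist):
-- 		# if ('TILE' in sublist) and (TileType in sublist):
-- 			# marker = True
-- 	return RemoveComments(templist)
-- ===== SOURCE B (Python) =====
-- def GetTileFromFile(list, TileType):
--     # one streaming pass: select rows with the TILE/EndTILE marker and clean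
--     # each selected row immediately (cut at first '#' token, drop '' tokens)
--     output = []
--     marker = False
--     for sublist in list:
--         if 'EndTILE' in sublist:
--             marker = False
--         if ('TILE' in sublist) and (TileType in sublist):
--             marker = True
--         if marker:
--             cleaned = []
--             for item in sublist:
--                 if item.startswith('#'):
--                     break
--                 if item != '':
--                     cleaned.append(item)
--             if cleaned:
--                 output.append(cleaned)
--     return output
-- ===== Notes on version B (the rewrite author's own statement) =====
-- stated objective: simpler
-- what changed: B fuses the two passes (row collection then RemoveComments) into one streaming loop that cleans each selected row immediately with a break-at-first-'#' scan, dropping the helper, the intermediate templist and A's append-then-remove('') dance.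
import Mathlib
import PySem

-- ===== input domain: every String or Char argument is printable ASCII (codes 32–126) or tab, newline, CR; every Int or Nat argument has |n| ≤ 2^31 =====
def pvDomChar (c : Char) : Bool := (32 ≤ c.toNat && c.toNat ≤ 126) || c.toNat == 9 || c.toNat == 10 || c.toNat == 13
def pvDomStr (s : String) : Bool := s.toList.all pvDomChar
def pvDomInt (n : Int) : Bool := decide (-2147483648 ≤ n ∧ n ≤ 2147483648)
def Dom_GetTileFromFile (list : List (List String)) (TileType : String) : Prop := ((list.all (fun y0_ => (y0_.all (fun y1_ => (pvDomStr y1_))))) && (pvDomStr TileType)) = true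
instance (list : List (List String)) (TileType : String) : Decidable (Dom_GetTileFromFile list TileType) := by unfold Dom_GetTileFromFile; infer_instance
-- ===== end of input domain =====

-- B fuses A's two passes (marker-based row collection, then the RemoveComments
-- helper) into one streaming loop that cleans each selected row immediately;
-- same return value, simpler structure.

-- ===== PORT A =====
-- body of the inner loop of RemoveComments: state (templist, marker)
def rcStep (st : List String × Bool) (item : String) : List String × Bool :=
  let marker := if PySem.Str.startswith item "#" then true else st.2
  if !(PySem.Str.startswith item "#" || marker) then
    let t := st.1 ++ [item]
    (if item = "" then (PySem.List.remove? t "").getD t else t, marker)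
  else (st.1, marker)

-- body of the outer loop of RemoveComments
def rcOuterStep (output : List (List String)) (sublist : List String) : List (List String) :=
  let templist := (sublist.foldl rcStep ([], false)).1
  if templist ≠ [] then output ++ [templist] else output

def RemoveComments (list : List (List String)) : List (List String) :=
  list.foldl rcOuterStep []

-- body of GetTileFromFile's loop: state (templist, marker)
def collectStep (TileType : String) (st : List (List String) × Bool) (sublist : List String) :
    List (List String) × Bool :=
  let marker := if "EndTILE" ∈ sublist then false else st.2
  let marker := if ("TILE" ∈ sublist) ∧ (TileType ∈ sublist) then true else marker
  if marker then (st.1 ++ [sublist], marker) else (st.1, marker)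

def GetTileFromFile (list : List (List String)) (TileType : String) : List (List String) :=
  RemoveComments ((list.foldl (collectStep TileType) ([], false)).1)

-- ===== PORT B =====
-- Source B's inner for-loop with break: stop at the first '#'-token, keep non-'' tokens
def pvCleanRowB : List String → List String
  | [] => []
  | item :: rest =>
    if PySem.Str.startswith item "#" then []
    else if item ≠ "" then item :: pvCleanRowB rest
    else pvCleanRowB rest

-- body of Source B's single fused loop: state (output, marker)
def altStep (TileType : String) (st : List (List String) × Bool) (sublist : List String) :
    List (List String) × Bool :=
  let marker := if "EndTILE" ∈ sublist then false else st.2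
  let marker := if ("TILE" ∈ sublist) ∧ (TileType ∈ sublist) then true else marker
  if marker then
    let cleaned := pvCleanRowB sublist
    (if cleaned ≠ [] then st.1 ++ [cleaned] else st.1, marker)
  else (st.1, marker)

def GetTileFromFile_alt (list : List (List String)) (TileType : String) : List (List String) :=
  (list.foldl (altStep TileType) ([], false)).1

-- ===== PRECONDITION & SPEC =====
def Spec_GetTileFromFile (list : List (List String)) (TileType : String) (out : List (List String)) : Prop := out = GetTileFromFile_alt list TileType
instance (list : List (List String)) (TileType : String) (out : List (List String)) : Decidable (Spec_GetTileFromFile list TileType out) := by unfold Spec_GetTileFromFile; infer_instance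

-- ===== CLAIM (what is proved, stated in full; the proofs are below) =====
def Claim_equal_GetTileFromFile : Prop := ∀ (list : List (List String)) (TileType : String), Dom_GetTileFromFile list TileType → Spec_GetTileFromFile list TileType (GetTileFromFile list TileType)

-- ===== LEMMAS AND PROOFS =====

-- the shared marker update, factored for the proofs
def markerUpd (TileType : String) (s : List String) (m : Bool) : Bool :=
  let m1 := if "EndTILE" ∈ s then false else m
  if ("TILE" ∈ s) ∧ (TileType ∈ s) then true else m1

theorem collectStep_eq (TileType : String) (acc : List (List String)) (m : Bool) (s : List String) :
    collectStep TileType (acc, m) s =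
      (if markerUpd TileType s m then acc ++ [s] else acc, markerUpd TileType s m) := by
  unfold collectStep markerUpd
  by_cases h1 : ("TILE" ∈ s) ∧ (TileType ∈ s) <;> by_cases h2 : "EndTILE" ∈ s <;>
    cases m <;> simp [h1, h2]

theorem altStep_eq (TileType : String) (acc : List (List String)) (m : Bool) (s : List String) :
    altStep TileType (acc, m) s =
      (if markerUpd TileType s m then
         (if pvCleanRowB s ≠ [] then acc ++ [pvCleanRowB s] else acc)
       else acc, markerUpd TileType s m) := by
  unfold altStep markerUpd
  by_cases h1 : ("TILE" ∈ s) ∧ (TileType ∈ s) <;> by_cases h2 : "EndTILE" ∈ s <;>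
    cases m <;> simp [h1, h2]

-- removing the '' just appended to a ''-free list gives the list back
theorem remove_append_empty (acc : List String) (h : "" ∉ acc) :
    (PySem.List.remove? (acc ++ [""]) "").getD (acc ++ [""]) = acc := by
  induction acc with
  | nil => simp
  | cons x xs ih =>
    have hx : x ≠ "" := by intro e; exact h (e ▸ List.mem_cons_self)
    have hxs : "" ∉ xs := fun m => h (List.mem_cons_of_mem _ m)
    simp only [List.cons_append, PySem.List.remove?_cons_of_ne _ hx]
    have := ih hxs
    cases hr : PySem.List.remove? (xs ++ [""]) "" with
    | none => simp [hr] at this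
    | some r => simp [hr] at this ⊢; exact this

theorem rcStep_true (acc : List String) (item : String) : rcStep (acc, true) item = (acc, true) := by
  simp [rcStep]

theorem rcStep_hash (acc : List String) (m : Bool) (item : String)
    (hs : PySem.Str.startswith item "#" = true) : rcStep (acc, m) item = (acc, true) := by
  have hs' : PySem.Chars.startswith item.toList ['#'] = true := by simpa using hs
  simp [rcStep, hs']

theorem rcStep_empty (acc : List String) (h : "" ∉ acc) :
    rcStep (acc, false) "" = (acc, false) := by
  have hs' : PySem.Chars.startswith ([] : List Char) ['#'] = false := by decide
  simp [rcStep, hs', remove_append_empty acc h]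

theorem rcStep_keep (acc : List String) (item : String)
    (hs : PySem.Str.startswith item "#" = false) (he : item ≠ "") :
    rcStep (acc, false) item = (acc ++ [item], false) := by
  have hs' : PySem.Chars.startswith item.toList ['#'] = false := by simpa using hs
  simp [rcStep, hs', he]

-- once A's inner marker is set the state never changes
theorem foldl_rcStep_true (items : List String) (acc : List String) :
    items.foldl rcStep (acc, true) = (acc, true) := by
  induction items generalizing acc with
  | nil => rfl
  | cons x xs ih => rw [List.foldl_cons, rcStep_true]; exact ih acc

-- A's inner loop computes B's break-scan
theorem cleanA_eq_cleanB_aux (items : List String) (acc : List String) (h : "" ∉ acc) :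
    (items.foldl rcStep (acc, false)).1 = acc ++ pvCleanRowB items := by
  induction items generalizing acc with
  | nil => simp [pvCleanRowB]
  | cons x xs ih =>
    rw [List.foldl_cons]
    by_cases hs : PySem.Str.startswith x "#"
    · have hs' : PySem.Chars.startswith x.toList ['#'] = true := by simpa using hs
      rw [rcStep_hash acc false x hs, foldl_rcStep_true]
      simp [pvCleanRowB, hs']
    · by_cases he : x = ""
      · subst he
        have hs' : PySem.Chars.startswith ([] : List Char) ['#'] = false := by decide
        rw [rcStep_empty acc h, ih acc h]
        simp [pvCleanRowB, hs']
      · have hs' : PySem.Chars.startswith x.toList ['#'] = false := by simpa using hs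
        rw [rcStep_keep acc x (by simpa using hs) he,
          ih (acc ++ [x]) (by simp [h]; exact he)]
        simp [pvCleanRowB, hs', he]

theorem cleanA_eq_cleanB (s : List String) : (s.foldl rcStep ([], false)).1 = pvCleanRowB s := by
  simpa using cleanA_eq_cleanB_aux s [] (by simp)

-- the rows A collects before calling RemoveComments, given the current marker
def collectA (TileType : String) : List (List String) → Bool → List (List String)
  | [], _ => []
  | s :: rest, m =>
    let m2 := markerUpd TileType s m
    if m2 then s :: collectA TileType rest m2 else collectA TileType rest m2

theorem collectA_spec (TileType : String) (l : List (List String)) (acc : List (List String)) (m : Bool) :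
    (l.foldl (collectStep TileType) (acc, m)).1 = acc ++ collectA TileType l m := by
  induction l generalizing acc m with
  | nil => simp [collectA]
  | cons s rest ih =>
    rw [List.foldl_cons, collectStep_eq]
    by_cases h : markerUpd TileType s m
    · simp only [collectA, h, if_true, ih]; simp
    · simp only [collectA, h, if_false, Bool.false_eq_true, ih]

-- RemoveComments as a plain structural recursion over B's cleaned rows
def rcPure : List (List String) → List (List String)
  | [] => []
  | s :: rest => if pvCleanRowB s ≠ [] then pvCleanRowB s :: rcPure rest else rcPure rest

theorem removeComments_aux (l : List (List String)) (acc : List (List String)) :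
    l.foldl rcOuterStep acc = acc ++ rcPure l := by
  induction l generalizing acc with
  | nil => simp [rcPure]
  | cons s rest ih =>
    rw [List.foldl_cons]
    have hstep : rcOuterStep acc s =
        if pvCleanRowB s ≠ [] then acc ++ [pvCleanRowB s] else acc := by
      unfold rcOuterStep; rw [cleanA_eq_cleanB]
    rw [hstep, ih]
    by_cases hc : pvCleanRowB s = [] <;> simp [rcPure, hc]

-- B's fused loop equals rcPure of the collected rows
theorem altAux (TileType : String) (l : List (List String)) (acc : List (List String)) (m : Bool) :
    (l.foldl (altStep TileType) (acc, m)).1 = acc ++ rcPure (collectA TileType l m) := by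
  induction l generalizing acc m with
  | nil => simp [collectA, rcPure]
  | cons s rest ih =>
    rw [List.foldl_cons, altStep_eq]
    by_cases h : markerUpd TileType s m
    · simp only [collectA, h, if_true, rcPure]
      by_cases hc : pvCleanRowB s = []
      · simp [hc, ih]
      · simp [hc, ih]
    · simp only [collectA, h, if_false, Bool.false_eq_true, ih]

-- ===== VERDICT (by name: the statement is the Claim_ definition above) =====
theorem GetTileFromFile_spec : Claim_equal_GetTileFromFile := by
  intro list TileType _
  show GetTileFromFile list TileType = GetTileFromFile_alt list TileType
  unfold GetTileFromFile GetTileFromFile_alt RemoveComments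
  rw [collectA_spec, removeComments_aux]
  simpa using (altAux TileType list [] false).symm
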